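-- pv_equiv track=rewrite | github.com/EngincanVaran/CS301-Algorithms | HW3/Python Files/evaran_HW3_py/Correctness_Benchmark_HW3.py | Benchmark_4
-- ===== SOURCE A (Python) =====
-- def Benchmark_4(n):
-- 	temp = [ [ 0 for i in range(3) ] for j in range(n) ]
-- 	i = 0
-- 	j = 0
-- 	k = 0
-- 	while(i<n-1):
-- 		temp[i+1][j] = 1
-- 		i+=1
-- 		if( k%4 == 0):
-- 			j+=1
-- 		elif( k%4 == 1):
-- 			j+=1
-- 		elif( k%4 == 2):
-- 			j-=1
-- 		else:
-- 			j-=1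
-- 		k+=1
-- 	return temp
-- ===== SOURCE B (Python) =====
-- def Benchmark_4(n):
--     temp = [[0, 0, 0] for _ in range(n)]
--     pattern = [0, 1, 2, 1]
--     for r in range(1, n):
--         temp[r][pattern[(r - 1) % 4]] = 1
--     return temp
-- ===== Notes on version B (the rewrite author's own statement) =====
-- stated objective: simpler
-- what changed: Replaces the running i/j/k state machine (increment j twice then decrement it twice) with a direct per-row lookup into the precomputed period-four column pattern.
import Mathlib
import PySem

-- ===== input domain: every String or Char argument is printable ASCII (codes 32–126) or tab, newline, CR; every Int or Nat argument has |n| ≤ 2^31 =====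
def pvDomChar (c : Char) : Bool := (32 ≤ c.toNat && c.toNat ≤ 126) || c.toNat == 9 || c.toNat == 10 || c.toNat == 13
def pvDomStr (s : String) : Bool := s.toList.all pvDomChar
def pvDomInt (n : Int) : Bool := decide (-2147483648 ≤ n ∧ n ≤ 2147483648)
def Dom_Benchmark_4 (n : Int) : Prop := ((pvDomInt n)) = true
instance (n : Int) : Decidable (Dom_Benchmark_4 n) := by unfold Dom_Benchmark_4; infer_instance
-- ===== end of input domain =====

-- B replaces A's i/j/k running-state machine with a direct lookup into the
-- precomputed period-4 column pattern [0,1,2,1]; objective: simpler.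


-- ===== PORT A =====
-- the while loop: state (temp, i, j, k); fuel = number of remaining iterations
def pvLoopA (n : Int) (temp : List (List Int)) (i j k : Int) : Nat → List (List Int)
  | 0 => temp
  | fuel + 1 =>
    if i < n - 1 then
      let temp' := PySem.List.pySetD temp (i + 1)
        (PySem.List.pySetD (PySem.List.pyGetD temp (i + 1) []) j 1)
      let j' := if PySem.Int.mod k 4 = 0 then j + 1
                else if PySem.Int.mod k 4 = 1 then j + 1
                else if PySem.Int.mod k 4 = 2 then j - 1
                else j - 1
      pvLoopA n temp' (i + 1) j' (k + 1) fuel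
    else temp

def Benchmark_4 (n : Int) : List (List Int) :=
  let temp := (PySem.List.pyRange 0 n 1).map
    (fun _ => (PySem.List.pyRange 0 3 1).map (fun _ => (0 : Int)))
  pvLoopA n temp 0 0 0 (n - 1).toNat

-- ===== PORT B =====
def Benchmark_4_alt (n : Int) : List (List Int) :=
  let temp := (PySem.List.pyRange 0 n 1).map (fun _ => ([0, 0, 0] : List Int))
  let pattern : List Int := [0, 1, 2, 1]
  (PySem.List.pyRange 1 n 1).foldl
    (fun temp r =>
      PySem.List.pySetD temp r
        (PySem.List.pySetD (PySem.List.pyGetD temp r [])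
          (PySem.List.pyGetD pattern (PySem.Int.mod (r - 1) 4) 0) 1))
    temp

-- ===== PRECONDITION & SPEC =====
def Spec_Benchmark_4 (n : Int) (out : List (List Int)) : Prop := out = Benchmark_4_alt n
instance (n : Int) (out : List (List Int)) : Decidable (Spec_Benchmark_4 n out) := by unfold Spec_Benchmark_4; infer_instance

-- ===== CLAIM (what is proved, stated in full; the proofs are below) =====
def Claim_equal_Benchmark_4 : Prop := ∀ (n : Int), Dom_Benchmark_4 n → Spec_Benchmark_4 n (Benchmark_4 n)

-- ===== LEMMAS AND PROOFS =====

-- B's update step, as a function (proof helper)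
def pvStepB (temp : List (List Int)) (r : Int) : List (List Int) :=
  PySem.List.pySetD temp r
    (PySem.List.pySetD (PySem.List.pyGetD temp r [])
      (PySem.List.pyGetD ([0, 1, 2, 1] : List Int) (PySem.Int.mod (r - 1) 4) 0) 1)

lemma pvMod4_cases (i : Int) :
    PySem.Int.mod i 4 = 0 ∨ PySem.Int.mod i 4 = 1 ∨
    PySem.Int.mod i 4 = 2 ∨ PySem.Int.mod i 4 = 3 := by
  have h0 := PySem.Int.mod_nonneg i (b := 4) (by omega)
  have h1 := PySem.Int.mod_lt i (b := 4) (by omega)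
  omega

lemma pvMod4_succ (i : Int) :
    PySem.Int.mod (i + 1) 4 =
      if PySem.Int.mod i 4 = 3 then 0 else PySem.Int.mod i 4 + 1 := by
  have e1 : PySem.Int.mod (i + 1) 4 = (i + 1) % 4 :=
    PySem.Int.mod_eq_emod_of_pos (by omega)
  have e2 : PySem.Int.mod i 4 = i % 4 :=
    PySem.Int.mod_eq_emod_of_pos (by omega)
  rw [e1, e2]
  omega

-- main invariant: with j = pattern[i % 4] and k = i, the rest of A's loop is B's fold over range(i+1, n)
lemma pvLoop_eq (fuel : Nat) : ∀ (n i : Int) (temp : List (List Int)),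
    fuel = (n - 1 - i).toNat →
    pvLoopA n temp i (PySem.List.pyGetD ([0, 1, 2, 1] : List Int) (PySem.Int.mod i 4) 0) i fuel
      = (PySem.List.pyRange (i + 1) n 1).foldl pvStepB temp := by
  induction fuel with
  | zero =>
    intro n i temp hf
    rw [PySem.List.pyRange_one_eq_nil (by omega)]
    simp [pvLoopA]
  | succ fuel ih =>
    intro n i temp hf
    have hi : i < n - 1 := by omega
    rw [PySem.List.pyRange_one_cons (by omega)]
    simp only [pvLoopA, if_pos hi, List.foldl_cons]
    have hstep : PySem.List.pySetD temp (i + 1)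
        (PySem.List.pySetD (PySem.List.pyGetD temp (i + 1) [])
          (PySem.List.pyGetD ([0, 1, 2, 1] : List Int) (PySem.Int.mod i 4) 0) 1)
        = pvStepB temp (i + 1) := by
      simp [pvStepB]
    have hj : (if PySem.Int.mod i 4 = 0 then
          PySem.List.pyGetD ([0, 1, 2, 1] : List Int) (PySem.Int.mod i 4) 0 + 1
        else if PySem.Int.mod i 4 = 1 then
          PySem.List.pyGetD ([0, 1, 2, 1] : List Int) (PySem.Int.mod i 4) 0 + 1
        else if PySem.Int.mod i 4 = 2 then
          PySem.List.pyGetD ([0, 1, 2, 1] : List Int) (PySem.Int.mod i 4) 0 - 1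
        else PySem.List.pyGetD ([0, 1, 2, 1] : List Int) (PySem.Int.mod i 4) 0 - 1)
        = PySem.List.pyGetD ([0, 1, 2, 1] : List Int) (PySem.Int.mod (i + 1) 4) 0 := by
      rcases pvMod4_cases i with h | h | h | h <;> rw [pvMod4_succ, h] <;> decide
    rw [hstep, hj, ih n (i + 1) (pvStepB temp (i + 1)) (by omega)]

-- ===== VERDICT (by name: the statement is the Claim_ definition above) =====
theorem Benchmark_4_spec : Claim_equal_Benchmark_4 := by
  intro n _
  unfold Spec_Benchmark_4 Benchmark_4 Benchmark_4_alt
  have h := pvLoop_eq (n - 1).toNat n 0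
    ((PySem.List.pyRange 0 n 1).map
      (fun _ => (PySem.List.pyRange 0 3 1).map (fun _ => (0 : Int)))) (by omega)
  simp only [show PySem.Int.mod 0 4 = 0 from by decide] at h
  simp only [show PySem.List.pyGetD ([0, 1, 2, 1] : List Int) 0 0 = 0 from by decide] at h
  rw [show (0 : Int) + 1 = 1 from rfl] at h
  simp only [h]
  have : (PySem.List.pyRange 0 3 1).map (fun _ => (0 : Int)) = ([0, 0, 0] : List Int) := by decide
  simp only [this]
  rfl
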